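-- pv_equiv track=rewrite | github.com/yarmash/projecteuler | python/problem036.py | mk_palindrome
-- ===== SOURCE A (Python) =====
-- def mk_palindrome(n, oddlength):
--     """Generate a palindrome in base 2."""
--     r = n
--     if oddlength:
--         n >>= 1
--     while n:
--         r = (r << 1) + (n & 1)
--         n >>= 1
--     return r
-- ===== SOURCE B (Python) =====
-- def mk_palindrome(n, oddlength):
--     """Generate a palindrome in base 2."""
--     s = bin(n)[2:]
--     if oddlength:
--         return int(s + s[-2::-1], 2)
--     return int(s + s[::-1], 2)
-- ===== Notes on version B (the rewrite author's own statement) =====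
-- stated objective: idiomatic
-- what changed: Replaces A's bit-shift accumulation loop with building the binary digit string once and mirroring it (string concatenation + slice reversal, then int(...,2)); Pre_ excludes negative n, on which A's while loop never terminates.
import Mathlib
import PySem

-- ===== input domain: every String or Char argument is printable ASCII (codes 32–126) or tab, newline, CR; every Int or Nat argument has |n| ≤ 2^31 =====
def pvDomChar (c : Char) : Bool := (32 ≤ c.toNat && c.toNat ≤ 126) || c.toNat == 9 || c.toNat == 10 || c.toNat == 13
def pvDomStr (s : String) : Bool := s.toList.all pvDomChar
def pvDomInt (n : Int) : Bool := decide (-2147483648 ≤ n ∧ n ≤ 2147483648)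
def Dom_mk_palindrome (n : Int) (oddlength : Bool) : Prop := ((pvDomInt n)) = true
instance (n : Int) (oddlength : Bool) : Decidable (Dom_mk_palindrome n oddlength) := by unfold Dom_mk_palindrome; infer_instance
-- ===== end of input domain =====

-- B replaces A's bit-shift accumulation loop with building the binary digit string and mirroring it (idiomatic; same cost).


-- ===== PORT A =====
-- the 'while n:' loop: r = (r << 1) + (n & 1); n >>= 1   (n > 0 on Pre_; guard makes it total)
def pvLoopA (n r : Int) : Int :=
  if _h : n ≤ 0 then r
  else pvLoopA (n / 2) (2 * r + n % 2)
termination_by n.toNat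
decreasing_by omega

def mk_palindrome (n : Int) (oddlength : Bool) : Int :=
  let r := n
  let n := if oddlength then n / 2 else n   -- n >>= 1  (floor shift; n ≥ 0 on Pre_, where />>1 = /2)
  pvLoopA n r

-- ===== PORT B =====
-- bin(n)[2:] for n ≥ 0: MSB-first digit chars, no leading zeros (empty for 0)
def pvBinGo : Nat → List Char
  | 0 => []
  | n + 1 => pvBinGo ((n + 1) / 2) ++ [if (n + 1) % 2 = 1 then '1' else '0']
decreasing_by exact Nat.div_lt_self (Nat.succ_pos n) one_lt_two

def pvBin (m : Nat) : List Char := if m = 0 then ['0'] else pvBinGo m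

-- int(s, 2)
def pvInt2 (s : List Char) : Int :=
  s.foldl (fun a c => 2 * a + (if c = '1' then 1 else 0)) 0

def mk_palindrome_alt (n : Int) (oddlength : Bool) : Int :=
  let s := pvBin n.toNat
  if oddlength then pvInt2 (s ++ s.dropLast.reverse)   -- s + s[-2::-1]
  else pvInt2 (s ++ s.reverse)                         -- s + s[::-1]

-- ===== PRECONDITION & SPEC =====
-- A's while loop never terminates for negative n (n >>= 1 stalls at -1), so Pre_ is n ≥ 0.
def Pre_mk_palindrome (n : Int) (oddlength : Bool) : Prop := 0 ≤ n
instance (n : Int) (oddlength : Bool) : Decidable (Pre_mk_palindrome n oddlength) := by unfold Pre_mk_palindrome; infer_instance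
def pvWitness_mk_palindrome : Int × Bool := (6, true)

def Spec_mk_palindrome (n : Int) (oddlength : Bool) (out : Int) : Prop := out = mk_palindrome_alt n oddlength
instance (n : Int) (oddlength : Bool) (out : Int) : Decidable (Spec_mk_palindrome n oddlength out) := by unfold Spec_mk_palindrome; infer_instance

-- ===== CLAIM (what is proved, stated in full; the proofs are below) =====
def Claim_equal_mk_palindrome : Prop := ∀ (n : Int) (oddlength : Bool), Dom_mk_palindrome n oddlength → Pre_mk_palindrome n oddlength → Spec_mk_palindrome n oddlength (mk_palindrome n oddlength)

-- ===== LEMMAS AND PROOFS =====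

def pvStep (a : Int) (c : Char) : Int := 2 * a + (if c = '1' then 1 else 0)

theorem pvInt2_eq_foldl (s : List Char) : pvInt2 s = s.foldl pvStep 0 := rfl

theorem foldl_pvStep_append (s t : List Char) (a : Int) :
    (s ++ t).foldl pvStep a = t.foldl pvStep (s.foldl pvStep a) := by
  simp [List.foldl_append]

-- the MSB-first digit list re-reads to its number
theorem pvInt2_pvBinGo (m : Nat) : ∀ a : Int, (pvBinGo m).foldl pvStep a = a * 2 ^ (pvBinGo m).length + m := by
  induction m using Nat.strong_induction_on with
  | _ m ih =>
    intro a
    match m with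
    | 0 => simp [pvBinGo]
    | k + 1 =>
      rw [pvBinGo, foldl_pvStep_append]
      rw [ih ((k + 1) / 2) (Nat.div_lt_self (Nat.succ_pos k) one_lt_two)]
      simp only [List.foldl_cons, List.foldl_nil, List.length_append, List.length_cons,
        List.length_nil, pvStep]
      have hbit : (if (if (k + 1) % 2 = 1 then '1' else '0') = '1' then (1 : Int) else 0)
          = (((k + 1) % 2 : Nat) : Int) := by
        rcases Nat.mod_two_eq_zero_or_one (k + 1) with h | h <;> simp [h]
      rw [hbit, pow_succ]
      have hcast : (((k + 1) / 2 : Nat) : Int) * 2 + (((k + 1) % 2 : Nat) : Int)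
          = ((k + 1 : Nat) : Int) := by push_cast; omega
      push_cast at hcast ⊢
      linear_combination hcast

-- the loop of A consumes the LSB-first bits, i.e. the reverse of pvBinGo
theorem pvLoopA_eq (m : Nat) : ∀ r : Int, pvLoopA (m : Int) r = (pvBinGo m).reverse.foldl pvStep r := by
  induction m using Nat.strong_induction_on with
  | _ m ih =>
    intro r
    match m with
    | 0 => rw [pvLoopA]; simp [pvBinGo]
    | k + 1 =>
      rw [pvLoopA]
      have hle : ¬ ((k + 1 : Nat) : Int) ≤ 0 := by omega
      rw [dif_neg hle]
      have hdiv : ((k + 1 : Nat) : Int) / 2 = (((k + 1) / 2 : Nat) : Int) := by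
        omega
      have hmod : ((k + 1 : Nat) : Int) % 2 = (((k + 1) % 2 : Nat) : Int) := by
        omega
      rw [hdiv, hmod, ih ((k + 1) / 2) (Nat.div_lt_self (Nat.succ_pos k) one_lt_two)]
      rw [pvBinGo]
      simp only [List.reverse_append, List.reverse_singleton, List.singleton_append, List.foldl_cons]
      congr 1
      rcases Nat.mod_two_eq_zero_or_one (k + 1) with h | h <;> simp [pvStep, h]

theorem pvBinGo_val (m : Nat) : pvInt2 (pvBinGo m) = m := by
  rw [pvInt2_eq_foldl, pvInt2_pvBinGo]; simp

theorem pvLoopA_zero (r : Int) : pvLoopA 0 r = r := by rw [pvLoopA]; simp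

theorem mk_palindrome_spec : Claim_equal_mk_palindrome := by
  intro n oddlength _hd hpre
  unfold Spec_mk_palindrome
  have hn : n = (n.toNat : Int) := (Int.toNat_of_nonneg hpre).symm
  set m := n.toNat with hm
  rcases Nat.eq_zero_or_pos m with h0 | hpos
  · -- n = 0: both sides compute to 0
    have hz : n = 0 := by omega
    subst hz
    cases oddlength <;>
      simp [mk_palindrome, mk_palindrome_alt, pvLoopA_zero, pvBin, pvInt2]
  · -- n > 0: pvBin m = pvBinGo m
    have hbin : pvBin m = pvBinGo m := by simp [pvBin, Nat.pos_iff_ne_zero.mp hpos]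
    unfold mk_palindrome mk_palindrome_alt
    simp only [hbin, ← hm]
    cases oddlength
    · -- even branch: pvLoopA n n = pvInt2 (s ++ s.reverse)
      simp only [Bool.false_eq_true, if_false]
      rw [hn, pvLoopA_eq, pvInt2_eq_foldl, foldl_pvStep_append, ← pvInt2_eq_foldl,
        pvBinGo_val, ← hn]
    · -- odd branch: pvLoopA (n/2) n = pvInt2 (s ++ s.dropLast.reverse)
      simp only [if_true]
      have hstep : pvBinGo m = pvBinGo (m / 2) ++ [if m % 2 = 1 then '1' else '0'] := by
        match m, hpos with
        | k + 1, _ => rw [pvBinGo]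
      have hdl : (pvBinGo m).dropLast = pvBinGo (m / 2) := by
        rw [hstep]; simp
      have hdiv : n / 2 = ((m / 2 : Nat) : Int) := by omega
      rw [hdiv, pvLoopA_eq, hdl, pvInt2_eq_foldl, foldl_pvStep_append, ← pvInt2_eq_foldl,
        pvBinGo_val, ← hn]
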